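-- pv_equiv track=rewrite | github.com/HuangHsinTzu/1102-final-exam-public | exam/p/p06.py | p06
-- ===== SOURCE A (Python) =====
-- def p06(nums = [2,7,11,15], target = 9):
--     output_list=None
--     # ↓程式區域↓
--     output_list = []
--     index = []
--     for i in range(0,len(nums)):
--         for j in range(0, len(nums)):
--             total = nums[i] + nums[j]
--             if(total == target and i != j):
--                 index.append(i)
--                 index.append(j)
--     output_list = set(index)
--     # ↑程式區域↑
--     return output_list
-- ===== SOURCE B (Python) =====
-- def p06(nums = [2,7,11,15], target = 9):
--     # Hash index value -> list of positions; for each i, look up its complement's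
--     # positions directly instead of scanning all j.
--     positions = {}
--     for idx, v in enumerate(nums):
--         positions.setdefault(v, []).append(idx)
--     out = set()
--     for i in range(len(nums)):
--         partners = [j for j in positions.get(target - nums[i], []) if j != i]
--         if partners:
--             out.add(i)
--             out.update(partners)
--     return out
-- ===== Notes on version B (the rewrite author's own statement) =====
-- stated objective: faster
-- what changed: Replaces the O(n^2) nested scan over all index pairs with a hash index from value to its positions built in one pass, so each i looks up its complement's positions directly.
import Mathlib
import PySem

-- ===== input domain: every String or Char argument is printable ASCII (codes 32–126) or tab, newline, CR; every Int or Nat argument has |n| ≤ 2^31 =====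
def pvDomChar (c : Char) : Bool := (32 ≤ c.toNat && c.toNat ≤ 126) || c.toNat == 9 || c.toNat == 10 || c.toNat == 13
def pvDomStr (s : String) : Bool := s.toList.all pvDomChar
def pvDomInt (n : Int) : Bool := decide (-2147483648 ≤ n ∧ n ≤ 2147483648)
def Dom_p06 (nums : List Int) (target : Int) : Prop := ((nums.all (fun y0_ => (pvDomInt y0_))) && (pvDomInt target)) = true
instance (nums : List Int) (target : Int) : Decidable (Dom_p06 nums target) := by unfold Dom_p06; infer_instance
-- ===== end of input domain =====

-- B replaces A's O(n^2) nested index scan by a hash index value -> positions built once;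
-- the return value is a Python set, ported as PySem.Set (list of distinct elements).

-- ===== PORT A =====
-- nested loops over range(len(nums)); indices are always in range, so pyGetD is exact here
def p06 (nums : List Int) (target : Int) : List Int :=
  let n : Int := PySem.List.len nums
  let index : List Int :=
    (PySem.List.pyRange 0 n 1).foldl (fun idx i =>
      (PySem.List.pyRange 0 n 1).foldl (fun idx j =>
        if PySem.List.pyGetD nums i 0 + PySem.List.pyGetD nums j 0 = target ∧ i ≠ j
        then idx ++ [i, j] else idx) idx) []
  PySem.Set.ofList index

-- ===== PORT B =====
def p06_alt (nums : List Int) (target : Int) : List Int :=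
  let positions : PySem.Dict Int (List Int) :=
    (PySem.List.enumerate nums 0).foldl
      (fun d p => d.modify p.2 [] (· ++ [p.1])) PySem.Dict.empty
  (PySem.List.pyRange 0 (PySem.List.len nums) 1).foldl (fun out i =>
    let partners :=
      (positions.getD (target - PySem.List.pyGetD nums i 0) []).filter (fun j => j ≠ i)
    if partners ≠ [] then PySem.Set.update (PySem.Set.add out i) partners else out) []

-- ===== PRECONDITION & SPEC =====
def Spec_p06 (nums : List Int) (target : Int) (out : List Int) : Prop := out = p06_alt nums target
instance (nums : List Int) (target : Int) (out : List Int) : Decidable (Spec_p06 nums target out) := by unfold Spec_p06; infer_instance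

-- ===== CLAIM (what is proved, stated in full; the proofs are below) =====
def Claim_equal_p06 : Prop := ∀ (nums : List Int) (target : Int), Dom_p06 nums target → Spec_p06 nums target (p06 nums target)

-- ===== LEMMAS AND PROOFS =====

theorem flatMap_if_eq_filter_flatMap {α β : Type} (p : α → Prop) [DecidablePred p] (f : α → List β) (l : List α) :
    l.flatMap (fun x => if p x then f x else []) = (l.filter (fun x => decide (p x))).flatMap f := by
  induction l with
  | nil => rfl
  | cons a t ih => by_cases h : p a <;> simp [List.flatMap_cons, h, ih]

theorem foldl_flatMap_eq {α β γ : Type} (g : α → List β) (f : γ → β → γ) :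
    ∀ (l : List α) (s : γ), (l.flatMap g).foldl f s = l.foldl (fun s x => (g x).foldl f s) s := by
  intro l
  induction l with
  | nil => intro s; rfl
  | cons a t ih => intro s; simp [List.flatMap_cons, List.foldl_append, ih]

theorem add_of_mem {s : PySem.Set Int} {i : Int} (h : i ∈ s) : PySem.Set.add s i = s := by
  simp [PySem.Set.add, PySem.Set.contains, h]

theorem mem_add_of_mem {s : PySem.Set Int} {i j : Int} (h : i ∈ s) : i ∈ PySem.Set.add s j := by
  simp [PySem.Set.mem_add, h]

theorem pair_fold_mem (i : Int) :
    ∀ (t : List Int) (s : PySem.Set Int), i ∈ s →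
      ((t.flatMap (fun j => [i, j])).foldl PySem.Set.add s = t.foldl PySem.Set.add s) := by
  intro t
  induction t with
  | nil => intro s _; rfl
  | cons j t ih =>
      intro s hs
      simp only [List.flatMap_cons, List.foldl_append, List.foldl_cons, List.foldl_nil]
      rw [add_of_mem hs]
      exact ih _ (mem_add_of_mem hs)

theorem block_fold (i : Int) (ps : List Int) (s : PySem.Set Int) :
    (ps.flatMap (fun j => [i, j])).foldl PySem.Set.add s
      = if ps ≠ [] then ps.foldl PySem.Set.add (PySem.Set.add s i) else s := by
  cases ps with
  | nil => rfl
  | cons j t =>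
      simp only [ne_eq, reduceCtorEq, not_false_iff, if_pos, List.flatMap_cons,
        List.foldl_append, List.foldl_cons, List.foldl_nil]
      exact pair_fold_mem i t _ (mem_add_of_mem (by simp [PySem.Set.mem_add]))

theorem positions_getD (nums : List Int) (c : Int) :
    ((PySem.List.enumerate nums 0).foldl
        (fun d p => d.modify p.2 [] (· ++ [p.1])) PySem.Dict.empty).getD c []
      = (PySem.List.pyRange 0 (PySem.List.len nums) 1).filter
          (fun j => PySem.List.pyGetD nums j 0 == c) := by
  have h1 : (PySem.List.enumerate nums 0).foldl
        (fun d p => d.modify p.2 [] (· ++ [p.1])) (PySem.Dict.empty : PySem.Dict Int (List Int))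
      = ((PySem.List.enumerate nums 0).map (fun p => (p.2, p.1))).foldl
          (fun d q => d.modify q.1 [] (· ++ [q.2])) PySem.Dict.empty := by
    rw [List.foldl_map]
  rw [h1, PySem.Dict.getD_foldl_modify_append]
  rw [PySem.List.enumerate_eq_map_pyRange (d := 0)]
  simp [List.filter_map, List.map_map, Function.comp_def]

theorem p06_eq (nums : List Int) (target : Int) : p06 nums target = p06_alt nums target := by
  unfold p06 p06_alt
  simp only [positions_getD]
  -- name the common pieces
  have hinner : ∀ (idx : List Int) (i : Int),
      (PySem.List.pyRange 0 (PySem.List.len nums) 1).foldl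
        (fun idx j =>
          if PySem.List.pyGetD nums i 0 + PySem.List.pyGetD nums j 0 = target ∧ i ≠ j
          then idx ++ [i, j] else idx) idx
      = idx ++ ((PySem.List.pyRange 0 (PySem.List.len nums) 1).filter
          (fun j => decide (PySem.List.pyGetD nums i 0 + PySem.List.pyGetD nums j 0 = target ∧ i ≠ j))).flatMap
            (fun j => [i, j]) := by
    intro idx i
    have h : (fun (idx : List Int) (j : Int) =>
        if PySem.List.pyGetD nums i 0 + PySem.List.pyGetD nums j 0 = target ∧ i ≠ j
        then idx ++ [i, j] else idx)
      = fun idx j => idx ++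
          (if PySem.List.pyGetD nums i 0 + PySem.List.pyGetD nums j 0 = target ∧ i ≠ j
           then [i, j] else []) := by
      funext idx j; split <;> simp
    rw [h, PySem.List.foldl_append_eq_flatMap,
      flatMap_if_eq_filter_flatMap (fun j => PySem.List.pyGetD nums i 0 + PySem.List.pyGetD nums j 0 = target ∧ i ≠ j)]
  have houter : (fun (idx : List Int) (i : Int) =>
      (PySem.List.pyRange 0 (PySem.List.len nums) 1).foldl
        (fun idx j =>
          if PySem.List.pyGetD nums i 0 + PySem.List.pyGetD nums j 0 = target ∧ i ≠ j
          then idx ++ [i, j] else idx) idx)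
    = fun idx i => idx ++ ((PySem.List.pyRange 0 (PySem.List.len nums) 1).filter
          (fun j => decide (PySem.List.pyGetD nums i 0 + PySem.List.pyGetD nums j 0 = target ∧ i ≠ j))).flatMap
            (fun j => [i, j]) := funext fun idx => funext fun i => hinner idx i
  rw [houter, PySem.List.foldl_append_eq_flatMap, List.nil_append,
    PySem.Set.ofList_eq_foldl, foldl_flatMap_eq]
  apply PySem.List.foldl_congr_mem
  intro s i _
  rw [block_fold]
  have hfilt : (PySem.List.pyRange 0 (PySem.List.len nums) 1).filter
      (fun j => decide (PySem.List.pyGetD nums i 0 + PySem.List.pyGetD nums j 0 = target ∧ i ≠ j))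
    = ((PySem.List.pyRange 0 (PySem.List.len nums) 1).filter
        (fun j => PySem.List.pyGetD nums j 0 == target - PySem.List.pyGetD nums i 0)).filter
        (fun j => decide (j ≠ i)) := by
    rw [List.filter_filter]
    apply List.filter_congr
    intro j _
    rw [Bool.eq_iff_iff]
    simp only [decide_eq_true_eq, Bool.and_eq_true, beq_iff_eq]
    omega
  rw [hfilt]
  simp only [PySem.Set.update]

-- ===== VERDICT (by name: the statement is the Claim_ definition above) =====
theorem p06_spec : Claim_equal_p06 := by
  intro nums target _
  unfold Spec_p06
  exact p06_eq nums target
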